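-- pv_equiv track=rewrite | github.com/qianjun1985/word-count | src/word-count-gui_v1.5.py | group_by_first_letter
-- ===== SOURCE A (Python) =====
-- from collections import Counter, defaultdict
--
-- def group_by_first_letter(words, word_freq=None):
--     groups = defaultdict(list)
--     for word in words:
--         if word:
--             first_letter = word[0].lower()
--             groups[first_letter].append(word)
--     if word_freq:
--         for letter in groups:
--             groups[letter].sort(key=lambda x: -word_freq.get(x, 0))
--     return dict(sorted(groups.items()))
-- ===== SOURCE B (Python) =====
-- def group_by_first_letter(words, word_freq=None):
--     valid = [w for w in words if w]
--     letters = sorted({w[0].lower() for w in valid})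
--     if word_freq:
--         valid = sorted(valid, key=lambda w: -word_freq.get(w, 0))
--     return {L: [w for w in valid if w[0].lower() == L] for L in letters}
-- ===== Notes on version B (the rewrite author's own statement) =====
-- stated objective: alternative
-- what changed: Replaces the defaultdict grouping pass with per-bucket in-place sorts and a final items sort by a single stable sort of the whole filtered word list by descending frequency, building the result by filtering that one sorted list for each letter of the sorted letter set.
import Mathlib
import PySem

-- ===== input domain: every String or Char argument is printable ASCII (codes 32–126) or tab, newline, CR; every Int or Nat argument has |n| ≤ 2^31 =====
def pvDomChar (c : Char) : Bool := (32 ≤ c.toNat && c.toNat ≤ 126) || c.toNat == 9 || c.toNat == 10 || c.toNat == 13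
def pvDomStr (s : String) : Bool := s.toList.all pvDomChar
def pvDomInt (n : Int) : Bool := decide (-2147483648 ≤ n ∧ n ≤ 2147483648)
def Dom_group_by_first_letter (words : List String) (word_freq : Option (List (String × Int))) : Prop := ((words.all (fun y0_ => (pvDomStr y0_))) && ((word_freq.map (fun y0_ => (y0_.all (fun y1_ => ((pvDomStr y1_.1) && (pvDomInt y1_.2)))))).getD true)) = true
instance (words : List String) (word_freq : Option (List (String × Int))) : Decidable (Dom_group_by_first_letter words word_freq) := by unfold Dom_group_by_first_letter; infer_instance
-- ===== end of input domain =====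

-- B replaces A's defaultdict pass, per-bucket sorts and final items sort with one stable sort of
-- the whole filtered word list plus a per-letter filter (alternative decomposition, similar cost).


-- ===== PORT A =====
-- word[0].lower() (guarded by 'if word', so the [] arm is unreachable)
def firstLowerA (w : String) : String :=
  match w.toList with
  | c :: _ => String.ofList [PySem.Chars.lowerChar c]
  | [] => ""

-- word_freq.get(x, 0)
def freqGetDA (wf : List (String × Int)) (x : String) : Int := (PySem.Dict.mk wf).getD x 0

-- the defaultdict(list) loop; 'if word:' is the w ≠ "" guard
def group_by_first_letter (words : List String) (word_freq : Option (List (String × Int))) : List (String × List String) :=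
  let groups : PySem.Dict String (List String) :=
    words.foldl (fun d w => if w = "" then d else d.modify (firstLowerA w) [] (· ++ [w])) PySem.Dict.empty
  -- 'if word_freq:' — falsy for None and for the empty dict; the loop sorts each bucket in place
  let items2 : List (String × List String) :=
    match word_freq with
    | some (p :: ps) => groups.items.map (fun q => (q.1, PySem.List.sorted q.2 (fun x => -(freqGetDA (p :: ps) x)) false))
    | _ => groups.items
  -- dict(sorted(groups.items())): tuple comparison, but keys are distinct so it is the sort by first component
  PySem.List.sorted items2 (fun q => q.1) false

-- ===== PORT B =====
-- word[0].lower() (guarded by 'if word', so the [] arm is unreachable)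
def firstLowerB (w : String) : String :=
  match w.toList with
  | [] => ""
  | c :: _ => String.ofList [PySem.Chars.lowerChar c]

-- word_freq.get(x, 0)
def freqGetDB (wf : List (String × Int)) (x : String) : Int := (PySem.Dict.mk wf).getD x 0

def group_by_first_letter_alt (words : List String) (word_freq : Option (List (String × Int))) : List (String × List String) :=
  let valid := words.filter (fun w => w ≠ "")
  let letters := PySem.List.sorted (PySem.Set.ofList (valid.map firstLowerB)) (fun L => L) false
  let valid2 :=
    match word_freq with
    | none => valid
    | some [] => valid
    | some (p :: ps) => PySem.List.sorted valid (fun w => -(freqGetDB (p :: ps) w)) false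
  letters.map (fun L => (L, valid2.filter (fun w => firstLowerB w = L)))

-- ===== PRECONDITION & SPEC =====
def Spec_group_by_first_letter (words : List String) (word_freq : Option (List (String × Int))) (out : List (String × List String)) : Prop := out = group_by_first_letter_alt words word_freq
instance (words : List String) (word_freq : Option (List (String × Int))) (out : List (String × List String)) : Decidable (Spec_group_by_first_letter words word_freq out) := by unfold Spec_group_by_first_letter; infer_instance

-- ===== CLAIM (what is proved, stated in full; the proofs are below) =====
def Claim_equal_group_by_first_letter : Prop := ∀ (words : List String) (word_freq : Option (List (String × Int))), Dom_group_by_first_letter words word_freq → Spec_group_by_first_letter words word_freq (group_by_first_letter words word_freq)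

-- ===== LEMMAS AND PROOFS =====

-- skipping falsy words in A's fold is folding over B's filtered list
theorem foldl_guard {β : Type} (step : β → String → β) (words : List String) (d : β) :
    words.foldl (fun d w => if w = "" then d else step d w) d
      = (words.filter (fun w => w ≠ "")).foldl step d := by
  induction words generalizing d with
  | nil => rfl
  | cons w ws ih => by_cases h : w = "" <;> simp [h, ih]

theorem keys_insert_eq {κ ν : Type} [BEq κ] [LawfulBEq κ] (d : PySem.Dict κ ν) (k : κ) (v : ν) :
    (d.insert k v).keys = PySem.Set.add d.keys k := by
  simp only [PySem.Dict.insert, PySem.Set.add, PySem.Dict.keys, PySem.Dict.contains, PySem.Set.contains]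
  have hmem : (d.items.any fun p => p.1 == k) = (List.map (fun x => x.1) d.items).contains k := by
    rw [Bool.eq_iff_iff]; simp
  by_cases h : (d.items.any fun p => p.1 == k) = true
  · rw [if_pos h, if_pos (hmem ▸ h)]
    rw [List.map_map]
    apply List.map_congr_left
    intro p hp
    by_cases hk : (p.1 == k) = true <;> simp [hk]
    exact (by simpa using hk : p.1 = k).symm
  · rw [if_neg h, if_neg (fun hc => h (hmem ▸ hc))]
    simp

-- keys of A's grouping fold: first occurrences, in order
theorem helpers_eqF : firstLowerA = firstLowerB := by
  funext w
  unfold firstLowerA firstLowerB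
  cases w.toList <;> rfl
theorem helpers_eqG : freqGetDA = freqGetDB := rfl

theorem keys_groups (l : List String) (d : PySem.Dict String (List String)) :
    (l.foldl (fun d w => d.modify (firstLowerA w) [] (· ++ [w])) d).keys
      = PySem.Set.update d.keys (l.map firstLowerA) := by
  induction l generalizing d with
  | nil => rfl
  | cons w ws ih =>
    rw [List.foldl_cons, ih, PySem.Dict.keys_modify, keys_insert_eq]
    simp [PySem.Set.update]

-- each bucket of A's grouping fold is a filter of the word list
theorem getD_groups (valid : List String) (L : String) (d : PySem.Dict String (List String)) :
    (valid.foldl (fun d w => d.modify (firstLowerA w) [] (· ++ [w])) d).getD L []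
      = d.getD L [] ++ valid.filter (fun w => firstLowerA w == L) := by
  induction valid generalizing d with
  | nil => simp
  | cons w ws ih =>
    rw [List.foldl_cons, ih, PySem.Dict.getD_modify]
    by_cases h : L = firstLowerA w
    · simp [h]
    · have h' : (firstLowerA w == L) = false := by simp; exact fun e => h e.symm
      simp [h, h']

-- A's grouping dict, fully characterised
theorem items_groups (valid : List String) :
    (valid.foldl (fun d w => d.modify (firstLowerA w) [] (· ++ [w]))
        (PySem.Dict.empty : PySem.Dict String (List String))).items
      = (PySem.Set.ofList (valid.map firstLowerA)).map
          (fun L => (L, valid.filter (fun w => firstLowerA w == L))) := by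
  set G := valid.foldl (fun d w => d.modify (firstLowerA w) [] (· ++ [w]))
      (PySem.Dict.empty : PySem.Dict String (List String)) with hG
  have hkeys : G.keys = PySem.Set.ofList (valid.map firstLowerA) := by
    rw [hG, keys_groups, PySem.Set.ofList_eq_foldl]
    rfl
  have hnd : G.keys.Nodup := by rw [hkeys]; exact PySem.Set.nodup_ofList _
  rw [PySem.Dict.items_eq_map_keys G hnd [], hkeys]
  apply List.map_congr_left
  intro L _
  rw [hG, getD_groups]
  simp

-- sorting letter-keyed items with distinct keys is mapping over the sorted letters
theorem sorted_map_set (xs : List String) (v : String → List String) :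
    PySem.List.sorted ((PySem.Set.ofList xs).map (fun L => (L, v L))) (fun q => q.1) false
      = (PySem.List.sorted (PySem.Set.ofList xs) (fun L => L) false).map (fun L => (L, v L)) := by
  apply PySem.List.sorted_eq_of_perm_of_pairwise_lt
  · exact (PySem.List.sorted_perm (PySem.Set.ofList xs) (fun L => L) false).map _
  · rw [List.pairwise_map]
    exact PySem.List.sorted_ofList_pairwise_lt xs

-- insertBy at the head when x precedes everything
theorem insertBy_head {α : Type} (before : α → α → Bool) (x : α) (l : List α)
    (h : ∀ z ∈ l, before x z = true) : PySem.List.insertBy before x l = x :: l := by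
  cases l with
  | nil => rfl
  | cons y ys => simp [PySem.List.insertBy, h y (by simp)]

-- filtering commutes with insertion into a ≤-sorted list
theorem filter_insertBy {α κ : Type} [LinearOrder κ] (key : α → κ) (p : α → Bool) (x : α) (l : List α)
    (h : l.Pairwise (fun a b => key a ≤ key b)) :
    (PySem.List.insertBy (fun a b => decide (key a < key b)) x l).filter p
      = if p x then PySem.List.insertBy (fun a b => decide (key a < key b)) x (l.filter p) else l.filter p := by
  induction l with
  | nil => by_cases hp : p x <;> simp [PySem.List.insertBy, hp]
  | cons y ys ih =>
    rcases List.pairwise_cons.mp h with ⟨hy, hys⟩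
    by_cases hb : key x < key y
    · rw [show PySem.List.insertBy (fun a b => decide (key a < key b)) x (y :: ys) = x :: y :: ys by
        simp [PySem.List.insertBy, hb]]
      by_cases hp : p x
      · rw [if_pos hp]
        rw [insertBy_head]
        · simp [List.filter_cons, hp]
        · intro z hz
          simp only [List.mem_filter] at hz
          rcases List.mem_cons.mp hz.1 with rfl | hzz
          · simpa using hb
          · simpa using lt_of_lt_of_le hb (hy z hzz)
      · simp [List.filter_cons, hp]
    · rw [show PySem.List.insertBy (fun a b => decide (key a < key b)) x (y :: ys) =
          y :: PySem.List.insertBy (fun a b => decide (key a < key b)) x ys by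
        simp [PySem.List.insertBy, hb]]
      by_cases hpy : p y
      · by_cases hp : p x
        · rw [if_pos hp]
          rw [List.filter_cons_of_pos hpy, ih hys, if_pos hp, List.filter_cons_of_pos hpy]
          rw [show PySem.List.insertBy (fun a b => decide (key a < key b)) x (y :: ys.filter p) =
              y :: PySem.List.insertBy (fun a b => decide (key a < key b)) x (ys.filter p) by
            simp [PySem.List.insertBy, hb]]
        · rw [if_neg hp, List.filter_cons_of_pos hpy, ih hys, if_neg hp, List.filter_cons_of_pos hpy]
      · rw [List.filter_cons_of_neg hpy, ih hys, List.filter_cons_of_neg hpy]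

-- filtering commutes with the stable sort: B's one global sort gives A's per-bucket sorts
theorem filter_sorted {α κ : Type} [LinearOrder κ] (key : α → κ) (p : α → Bool) (xs : List α) :
    (PySem.List.sorted xs key false).filter p = PySem.List.sorted (xs.filter p) key false := by
  induction xs using List.reverseRecOn with
  | nil => rfl
  | append_singleton xs x ih =>
    rw [PySem.List.sorted_eq_foldl_insertBy, List.foldl_append, List.foldl_cons, List.foldl_nil,
        ← PySem.List.sorted_eq_foldl_insertBy]
    rw [filter_insertBy key p x _ (PySem.List.sorted_pairwise xs key)]
    by_cases hp : p x
    · rw [if_pos hp, ih, List.filter_append, show List.filter p [x] = [x] by simp [hp]]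
      rw [PySem.List.sorted_eq_foldl_insertBy (xs.filter p ++ [x]) key, List.foldl_append,
          List.foldl_cons, List.foldl_nil, ← PySem.List.sorted_eq_foldl_insertBy]
    · rw [if_neg hp, ih, List.filter_append, show List.filter p [x] = [] by simp [hp], List.append_nil]

-- the two filter predicates are the same test
theorem filter_pred_eq (L : String) :
    (fun w => firstLowerA w == L) = (fun w => decide (firstLowerA w = L)) := by
  funext w; rw [Bool.eq_iff_iff]; simp

-- ===== VERDICT (by name: the statement is the Claim_ definition above) =====
theorem group_by_first_letter_spec : Claim_equal_group_by_first_letter := by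
  intro words word_freq _
  unfold Spec_group_by_first_letter group_by_first_letter group_by_first_letter_alt
  dsimp only
  rw [← helpers_eqF, ← helpers_eqG]
  rw [foldl_guard, items_groups]
  cases word_freq with
  | none =>
    rw [sorted_map_set]
    apply List.map_congr_left
    intro L _
    rw [filter_pred_eq]
  | some wf =>
    cases wf with
    | nil =>
      rw [sorted_map_set]
      apply List.map_congr_left
      intro L _
      rw [filter_pred_eq]
    | cons p ps =>
      dsimp only
      rw [List.map_map]
      rw [show ((fun q : String × List String => (q.1, PySem.List.sorted q.2 (fun x => -(freqGetDA (p :: ps) x)) false)) ∘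
            (fun L => (L, (words.filter (fun w => w ≠ "")).filter (fun w => firstLowerA w == L))))
          = (fun L => (L, PySem.List.sorted ((words.filter (fun w => w ≠ "")).filter (fun w => firstLowerA w == L)) (fun x => -(freqGetDA (p :: ps) x)) false)) from rfl]
      rw [sorted_map_set]
      apply List.map_congr_left
      intro L _
      rw [← filter_pred_eq, filter_sorted]
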